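-- pv_equiv track=rewrite | github.com/Maurdekye/Misc-Projects | Python/CMD scripts/memetext.py | squarecross
-- ===== SOURCE A (Python) =====
-- def spaceout(text):
--     return " ".join(list(text.upper()))
--
-- def square(text):
--     text = text.upper()
--     f = " ".join(list(text)) + "\n"
--     spacing = " " * (2 * len(text) - 3)
--     for l, r in zip(text[1:-1], text[1:-1][::-1]):
--         f += l + spacing + r + "\n"
--     f += " ".join(list(text[::-1])) + "\n"
--     return f
--
-- def squarecross(text):
--     if len(text) <= 2:
--         return square(text)
--     text = text.upper()
--     f = spaceout(text) + "\n"
--     lim = len(text) // 2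
--     if len(text) % 2 == 1:
--         for i, (l, r) in list(enumerate(zip(text[:lim], text[::-1][:lim])))[1:]:
--             ows = (2 * i - 1) * " "
--             iws = (4 * (lim - i) - 1) * " "
--             f += l + ows + l + iws + l + ows + r + "\n"
--         spc = (2 * lim - 1) * " "
--         f += text[lim] + spc + text[lim] + spc + text[lim] + "\n"
--         for i, (l, r) in list(enumerate(zip(text[lim+1:], text[::-1][lim+1:])))[:-1]:
--             iws = (4 * i + 3) * " "
--             ows = (2 * (lim - i) - 3) * " "
--             f += l + ows + l + iws + l + ows + r + "\n"
--     else: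
--         for i, (l, r) in list(enumerate(zip(text[:lim], text[::-1][:lim])))[1:]:
--             ows = (2 * i - 1) * " "
--             iws = (4 * (lim - i) - 3) * " "
--             f += l + ows + l + iws + l + ows + r + "\n"
--         for i, (l, r) in list(enumerate(zip(text[lim:], text[::-1][lim:])))[:-1]:
--             iws = (4 * i + 1) * " "
--             ows = (2 * (lim - i) - 3) * " "
--             f += l + ows + l + iws + l + ows + r + "\n"
--     f += spaceout(text)[::-1] + "\n"
--     return f
-- ===== SOURCE B (Python) =====
-- def squarecross(text):
--     t = text.upper()
--     n = len(t)
--     top = " ".join(t)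
--     rows = [top]
--     for r in range(1, n - 1):
--         row = [" "] * (2 * n - 1)
--         row[0] = t[r]
--         row[2 * r] = t[r]
--         row[2 * n - 2 - 2 * r] = t[r]
--         row[2 * n - 2] = t[n - 1 - r]
--         rows.append("".join(row))
--     rows.append(top[::-1])
--     return "".join(row + "\n" for row in rows)
-- ===== Notes on version B (the rewrite author's own statement) =====
-- stated objective: simpler
-- what changed: B replaces A's short-input helper, odd/even case split and three separate index loops with a single uniform pass that builds each middle row as a grid of spaces and plots the letter at columns 0, 2r, 2n-2-2r and 2n-2, joining the rows at the end.
import Mathlib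
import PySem

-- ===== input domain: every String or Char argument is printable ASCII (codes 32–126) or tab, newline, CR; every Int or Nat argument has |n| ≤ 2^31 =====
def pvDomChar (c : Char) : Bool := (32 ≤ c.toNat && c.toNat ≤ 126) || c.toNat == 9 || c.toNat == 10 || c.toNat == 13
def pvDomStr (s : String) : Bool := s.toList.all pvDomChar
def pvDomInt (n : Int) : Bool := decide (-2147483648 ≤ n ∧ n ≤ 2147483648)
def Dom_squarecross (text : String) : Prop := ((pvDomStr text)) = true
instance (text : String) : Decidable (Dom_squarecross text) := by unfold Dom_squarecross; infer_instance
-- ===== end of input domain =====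

-- B replaces A's odd/even case split and three index loops by one uniform pass that
-- plots each letter of the cross onto a grid row of spaces (objective: simpler).
-- Strings are ported on the List Char side (PySem.Chars), as the prelude prescribes.

-- ===== PORT A =====

-- " ".join(list(text.upper()))
def pvSpaceout (t : List Char) : List Char :=
  PySem.Chars.join [' '] ((PySem.Chars.upper t).map (fun c => [c]))

-- one line of A's middle loops:  l + ows + l + iws + l + ows + r + "\n"
def pvRowA (c1 c2 : Char) (ows iws : Nat) : List Char :=
  [c1] ++ List.replicate ows ' ' ++ [c1] ++ List.replicate iws ' ' ++
  [c1] ++ List.replicate ows ' ' ++ [c2] ++ ['\n']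

-- helper used by A only for len(text) <= 2
def pvSquare (text : List Char) : List Char :=
  let t := PySem.Chars.upper text
  let f := PySem.Chars.join [' '] (t.map (fun c => [c])) ++ ['\n']
  -- " " * (2*len(text)-3): negative counts give "" in Python, matched by Int.toNat
  let spacing := List.replicate (2 * (t.length : Int) - 3).toNat ' '
  let mid := PySem.List.slice t (some 1) (some (-1))          -- text[1:-1]
  -- text[1:-1][::-1] ported as List.reverse (exact)
  let f := (mid.zip mid.reverse).foldl
      (fun f lr => f ++ ([lr.1] ++ spacing ++ [lr.2] ++ ['\n'])) f
  f ++ (PySem.Chars.join [' '] (t.reverse.map (fun c => [c])) ++ ['\n'])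

def squarecrossCore (text : List Char) : List Char :=
  if text.length ≤ 2 then pvSquare text
  else
    let t := PySem.Chars.upper text
    let f := pvSpaceout t ++ ['\n']
    let lim := t.length / 2
    let f :=
      if t.length % 2 == 1 then
        -- list(enumerate(zip(text[:lim], text[::-1][:lim])))[1:]
        let f := ((PySem.List.enumerate ((t.take lim).zip (t.reverse.take lim))).drop 1).foldl
          (fun f ilr => f ++ pvRowA ilr.2.1 ilr.2.2
              (2 * ilr.1 - 1).toNat (4 * ((lim : Int) - ilr.1) - 1).toNat) f
        let spc := List.replicate (2 * (lim : Int) - 1).toNat ' '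
        let c := PySem.List.pyGetD t (lim : Int) ' '          -- text[lim]; always in range here
        let f := f ++ ([c] ++ spc ++ [c] ++ spc ++ [c] ++ ['\n'])
        -- list(enumerate(zip(text[lim+1:], text[::-1][lim+1:])))[:-1]
        ((PySem.List.enumerate ((t.drop (lim+1)).zip (t.reverse.drop (lim+1)))).dropLast).foldl
          (fun f ilr => f ++ pvRowA ilr.2.1 ilr.2.2
              (2 * ((lim : Int) - ilr.1) - 3).toNat (4 * ilr.1 + 3).toNat) f
      else
        let f := ((PySem.List.enumerate ((t.take lim).zip (t.reverse.take lim))).drop 1).foldl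
          (fun f ilr => f ++ pvRowA ilr.2.1 ilr.2.2
              (2 * ilr.1 - 1).toNat (4 * ((lim : Int) - ilr.1) - 3).toNat) f
        ((PySem.List.enumerate ((t.drop lim).zip (t.reverse.drop lim))).dropLast).foldl
          (fun f ilr => f ++ pvRowA ilr.2.1 ilr.2.2
              (2 * ((lim : Int) - ilr.1) - 3).toNat (4 * ilr.1 + 1).toNat) f
    f ++ ((pvSpaceout t).reverse ++ ['\n'])

def squarecross (text : String) : String := String.mk (squarecrossCore text.toList)

-- ===== PORT B =====

-- one grid row: spaces with t[r] plotted at columns 0, 2r, 2n-2-2r and t[n-1-r] at 2n-2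
-- (all indices are in range, so pyGetD/.toNat/.set are exact for the Python accesses)
def pvAltRow (t : List Char) (n : Nat) (r : Int) : List Char :=
  List.set
    (List.set
      (List.set
        (List.set (List.replicate (2*n - 1) ' ') 0 (PySem.List.pyGetD t r ' '))
        (2*r).toNat (PySem.List.pyGetD t r ' '))
      (2*(n : Int) - 2 - 2*r).toNat (PySem.List.pyGetD t r ' '))
    (2*n - 2) (PySem.List.pyGetD t ((n : Int) - 1 - r) ' ')

def squarecross_altCore (text : List Char) : List Char :=
  let t := PySem.Chars.upper text
  let n := t.length
  let top := PySem.Chars.join [' '] (t.map (fun c => [c]))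
  let rows := (PySem.List.pyRange 1 ((n : Int) - 1)).foldl
      (fun rows r => rows ++ [pvAltRow t n r]) [top]
  let rows := rows ++ [top.reverse]
  PySem.Chars.join [] (rows.map (fun row => row ++ ['\n']))

def squarecross_alt (text : String) : String := String.mk (squarecross_altCore text.toList)

-- ===== PRECONDITION & SPEC =====
def Spec_squarecross (text : String) (out : String) : Prop := out = squarecross_alt text
instance (text : String) (out : String) : Decidable (Spec_squarecross text out) := by unfold Spec_squarecross; infer_instance

-- ===== CLAIM (what is proved, stated in full; the proofs are below) =====
def Claim_equal_squarecross : Prop := ∀ (text : String), Dom_squarecross text → Spec_squarecross text (squarecross text)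

-- ===== LEMMAS AND PROOFS =====

theorem upperChar_idem (c : Char) :
    PySem.Chars.upperChar (PySem.Chars.upperChar c) = PySem.Chars.upperChar c := by
  unfold PySem.Chars.upperChar PySem.Chars.islower
  split_ifs with h1 h2 <;> try rfl
  exfalso
  simp only [Bool.and_eq_true, decide_eq_true_eq, Char.le_def, UInt32.le_iff_toNat_le] at h1 h2
  have hvt : ∀ d : Char, d.val.toNat = d.toNat := fun d => rfl
  simp only [hvt] at h1 h2
  have ha : ('a').toNat = 97 := rfl
  have hz : ('z').toNat = 122 := rfl
  have hval : (c.toNat - 32).isValidChar := Or.inl (by omega)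
  have key : (Char.ofNat (c.toNat - 32)).toNat = c.toNat - 32 := by
    rw [Char.toNat_ofNat, if_pos hval]
  rw [key] at h2
  omega

theorem upper_idem (t : List Char) :
    PySem.Chars.upper (PySem.Chars.upper t) = PySem.Chars.upper t := by
  simp [PySem.Chars.upper, upperChar_idem]

theorem length_upper (t : List Char) : (PySem.Chars.upper t).length = t.length := by
  simp [PySem.Chars.upper]

theorem rep_set (i k : Nat) (c x : Char) (h : i < k) :
    (List.replicate k c).set i x = List.replicate i c ++ x :: List.replicate (k-i-1) c := by
  induction i generalizing k with
  | zero => cases k with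
    | zero => omega
    | succ k => simp [List.replicate_succ]
  | succ i ih => cases k with
    | zero => omega
    | succ k =>
      simp only [List.replicate_succ, List.set_cons_succ, ih k (by omega)]
      simp [Nat.succ_sub_succ]

theorem set_cons_pos (a x : Char) (l : List Char) (i : Nat) (h : 0 < i) :
    (a :: l).set i x = a :: l.set (i-1) x := by
  cases i with | zero => omega | succ n => simp

theorem setPattern (W p q : Nat) (x w : Char) (hp : 0 < p) (hpq : p ≤ q) (hq : q < W - 1) :
    ((((List.replicate W ' ').set 0 x).set p x).set q x).set (W-1) w
    = [x] ++ List.replicate (p-1) ' ' ++ [x] ++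
      (if p = q then [] else List.replicate (q-p-1) ' ' ++ [x]) ++
      List.replicate (W-q-2) ' ' ++ [w] := by
  rw [rep_set 0 W ' ' x (by omega), List.replicate_zero, List.nil_append, Nat.sub_zero]
  rw [set_cons_pos _ _ _ _ hp, rep_set (p-1) (W-1) ' ' x (by omega)]
  have hWp : W - 1 - (p-1) - 1 = W - p - 1 := by omega
  rw [hWp]
  by_cases hpq' : p = q
  · subst hpq'
    rw [show ((x :: (List.replicate (p-1) ' ' ++ x :: List.replicate (W-p-1) ' ')).set p x)
         = x :: (List.replicate (p-1) ' ' ++ x :: List.replicate (W-p-1) ' ') from ?_]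
    · rw [set_cons_pos _ _ _ _ (by omega : (0:Nat) < W-1),
          List.set_append_right _ _ (by simp <;> omega),
          List.length_replicate,
          set_cons_pos _ _ _ _ (by omega : (0:Nat) < W-1-1-(p-1)),
          rep_set _ _ _ _ (by omega)]
      have h1 : W - 1 - 1 - (p-1) - 1 = W - p - 2 := by omega
      have h2 : W - p - 1 - (W-p-2) - 1 = 0 := by omega
      rw [h1, h2]
      simp
    · rw [set_cons_pos _ _ _ _ hp, List.set_append_right _ _ (by simp <;> omega),
          List.length_replicate, show p - 1 - (p-1) = 0 by omega]
      simp
  · rw [set_cons_pos _ _ _ _ (by omega : (0:Nat) < q),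
        List.set_append_right _ _ (by simp <;> omega), List.length_replicate,
        set_cons_pos _ _ _ _ (by omega : (0:Nat) < q - 1 - (p-1)),
        rep_set _ _ _ _ (by omega)]
    have h1 : q - 1 - (p-1) - 1 = q - p - 1 := by omega
    have h2 : W - p - 1 - (q-p-1) - 1 = W - q - 1 := by omega
    rw [h1, h2]
    rw [set_cons_pos _ _ _ _ (by omega : (0:Nat) < W-1),
        List.set_append_right _ _ (by simp <;> omega), List.length_replicate,
        set_cons_pos _ _ _ _ (by omega : (0:Nat) < W - 1 - 1 - (p-1)),
        List.set_append_right _ _ (by simp <;> omega), List.length_replicate,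
        set_cons_pos _ _ _ _ (by omega : (0:Nat) < W - 1 - 1 - (p-1) - 1 - (q-p-1)),
        rep_set _ _ _ _ (by omega)]
    have h3 : W - 1 - 1 - (p-1) - 1 - (q-p-1) - 1 = W - q - 2 := by omega
    have h4 : W - q - 1 - (W-q-2) - 1 = 0 := by omega
    rw [h3, h4]
    simp [hpq']

-- segment normal forms of a cross row
def rowSeg3 (x w : Char) (a b : Nat) : List Char :=
  [x] ++ List.replicate a ' ' ++ [x] ++ List.replicate b ' ' ++ [x] ++ List.replicate a ' ' ++ [w]

def rowSegC (x w : Char) (a : Nat) : List Char :=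
  [x] ++ List.replicate a ' ' ++ [x] ++ List.replicate a ' ' ++ [w]

theorem row_upper (t : List Char) (n r : Nat) (hn : n = t.length) (h1 : 1 ≤ r) (h2 : 2*r + 1 < n) :
    pvAltRow t n (r : Int)
    = rowSeg3 (t.getD r ' ') (t.getD (n-1-r) ' ') (2*r-1) (2*n-4*r-3) := by
  unfold pvAltRow
  rw [show ((2*(r:Int)).toNat) = 2*r by omega,
      show ((2*((n:Nat):Int) - 2 - 2*(r:Int)).toNat) = 2*n-2-2*r by omega,
      show ((n:Int) - 1 - (r:Int)) = ((n-1-r : Nat) : Int) by omega,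
      PySem.List.pyGetD_natCast, PySem.List.pyGetD_natCast,
      show (2*n - 2) = (2*n-1) - 1 by omega,
      setPattern (2*n-1) (2*r) (2*n-1-1-2*r) _ _ (by omega) (by omega) (by omega),
      if_neg (by omega : ¬ 2*r = 2*n-1-1-2*r)]
  rw [show 2*r - 1 = 2*r-1 by omega, show (2*n-1-1-2*r) - (2*r) - 1 = 2*n-4*r-3 by omega,
      show (2*n-1) - (2*n-1-1-2*r) - 2 = 2*r-1 by omega]
  simp [rowSeg3]

theorem row_center (t : List Char) (n r : Nat) (hn : n = t.length) (h1 : 1 ≤ r) (h2 : 2*r = n - 1) (h3 : 3 ≤ n) :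
    pvAltRow t n (r : Int)
    = rowSegC (t.getD r ' ') (t.getD (n-1-r) ' ') (n-2) := by
  unfold pvAltRow
  rw [show ((2*(r:Int)).toNat) = 2*r by omega,
      show ((2*((n:Nat):Int) - 2 - 2*(r:Int)).toNat) = 2*r by omega,
      show ((n:Int) - 1 - (r:Int)) = ((n-1-r : Nat) : Int) by omega,
      PySem.List.pyGetD_natCast, PySem.List.pyGetD_natCast,
      show (2*n - 2) = (2*n-1) - 1 by omega,
      setPattern (2*n-1) (2*r) (2*r) _ _ (by omega) (by omega) (by omega),
      if_pos rfl]
  rw [show 2*r - 1 = n-2 by omega, show (2*n-1) - (2*r) - 2 = n-2 by omega]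
  simp [rowSegC]

theorem row_lower (t : List Char) (n r : Nat) (hn : n = t.length) (h1 : n - 1 < 2*r) (h2 : r ≤ n - 2) (h3 : 3 ≤ n) :
    pvAltRow t n (r : Int)
    = rowSeg3 (t.getD r ' ') (t.getD (n-1-r) ' ') (2*n-3-2*r) (4*r+1-2*n) := by
  unfold pvAltRow
  rw [show ((2*(r:Int)).toNat) = 2*r by omega,
      show ((2*((n:Nat):Int) - 2 - 2*(r:Int)).toNat) = 2*n-2-2*r by omega,
      show ((n:Int) - 1 - (r:Int)) = ((n-1-r : Nat) : Int) by omega,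
      PySem.List.pyGetD_natCast, PySem.List.pyGetD_natCast,
      List.set_comm _ _ (by omega : (2*r : Nat) ≠ 2*n-2-2*r),
      show (2*n - 2) = (2*n-1) - 1 by omega,
      setPattern (2*n-1) (2*n-1-1-2*r) (2*r) _ _ (by omega) (by omega) (by omega),
      if_neg (by omega : ¬ 2*n-1-1-2*r = 2*r)]
  rw [show (2*n-1-1-2*r) - 1 = 2*n-3-2*r by omega,
      show (2*r) - (2*n-1-1-2*r) - 1 = 4*r+1-2*n by omega,
      show (2*n-1) - (2*r) - 2 = 2*n-3-2*r by omega]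
  simp [rowSeg3]

theorem pvRowA_eq (c1 c2 : Char) (a b : Nat) :
    pvRowA c1 c2 a b = rowSeg3 c1 c2 a b ++ ['\n'] := by
  simp [pvRowA, rowSeg3]

theorem foldl_enum_drop1 (xs : List (Char × Char)) (g : Int × (Char × Char) → List Char) (f0 : List Char) :
    ((PySem.List.enumerate xs).drop 1).foldl (fun f p => f ++ g p) f0
    = f0 ++ (List.range (xs.length - 1)).flatMap
        (fun k => g (((k+1 : Nat) : Int), xs.getD (k+1) (' ',' '))) := by
  rw [PySem.List.foldl_append_eq_flatMap g, PySem.List.enumerate_eq_map_pyRange xs (' ',' ')]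
  congr 1
  rw [show PySem.List.len xs = ((xs.length : Nat) : Int) from rfl, PySem.List.pyRange_zero_natCast,
      ← List.map_drop, ← List.map_drop]
  cases hl : xs.length with
  | zero => simp
  | succ l =>
    rw [List.range_succ_eq_map]
    simp only [List.drop_succ_cons, List.drop_zero, List.flatMap_map, List.map_map]
    apply List.flatMap_congr
    intro k _
    simp only [Function.comp_apply, Nat.succ_eq_add_one]
    rw [show (((k+1:Nat)):Int) = ((k:Int)+1) from by push_cast; ring] at *
    rw [show ((k:Int)+1) = (((k+1:Nat)):Int) from by push_cast; ring,
        PySem.List.pyGetD_natCast]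

theorem foldl_enum_dropLast (xs : List (Char × Char)) (g : Int × (Char × Char) → List Char) (f0 : List Char) :
    ((PySem.List.enumerate xs).dropLast).foldl (fun f p => f ++ g p) f0
    = f0 ++ (List.range (xs.length - 1)).flatMap
        (fun k => g ((k : Nat), xs.getD k (' ',' '))) := by
  rw [PySem.List.foldl_append_eq_flatMap g, PySem.List.enumerate_eq_map_pyRange xs (' ',' ')]
  congr 1
  rw [show PySem.List.len xs = ((xs.length : Nat) : Int) from rfl, PySem.List.pyRange_zero_natCast,
      ← List.map_dropLast, ← List.map_dropLast]
  cases hl : xs.length with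
  | zero => simp
  | succ l =>
    rw [List.range_succ, List.dropLast_concat]
    simp only [List.flatMap_map, Nat.succ_sub_one]
    apply List.flatMap_congr
    intro k _
    rw [PySem.List.pyGetD_natCast]

theorem getD_zip (as bs : List Char) (j : Nat) (ha : j < as.length) (hb : j < bs.length) :
    (as.zip bs).getD j (' ',' ') = (as.getD j ' ', bs.getD j ' ') := by
  rw [List.getD_eq_getElem _ _ (by simp [List.length_zip]; omega),
      List.getElem_zip, List.getD_eq_getElem _ _ ha, List.getD_eq_getElem _ _ hb]

theorem getD_take (t : List Char) (m j : Nat) (h : j < m) (h2 : m ≤ t.length) :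
    (t.take m).getD j ' ' = t.getD j ' ' := by
  rw [List.getD_eq_getElem _ _ (by simp; omega), List.getElem_take,
      List.getD_eq_getElem _ _ (by omega)]

theorem getD_rev (t : List Char) (j : Nat) (h : j < t.length) :
    t.reverse.getD j ' ' = t.getD (t.length-1-j) ' ' := by
  rw [List.getD_eq_getElem _ _ (by simp; omega), List.getElem_reverse,
      List.getD_eq_getElem _ _ (by omega)]

theorem getD_drop (t : List Char) (s j : Nat) (h : s + j < t.length) :
    (t.drop s).getD j ' ' = t.getD (s+j) ' ' := by
  rw [List.getD_eq_getElem _ _ (by simp; omega), List.getElem_drop,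
      List.getD_eq_getElem _ _ (by omega)]

theorem join_nil_flatten (ps : List (List Char)) : PySem.Chars.join [] ps = ps.flatten := by
  induction ps with
  | nil => simp [PySem.Chars.join_nil]
  | cons p rest ih =>
    cases rest with
    | nil => simp [PySem.Chars.join_singleton]
    | cons q r2 =>
      rw [PySem.Chars.join_cons_cons, ih]
      simp

theorem core_small (u : List Char) (h : u.length ≤ 2) : squarecrossCore u = squarecross_altCore u := by
  match u, h with
  | [], _ => rfl
  | [a], _ => rfl
  | [a,b], _ => rfl

theorem core_main (u : List Char) (h : 2 < u.length) : squarecrossCore u = squarecross_altCore u := by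
  unfold squarecrossCore squarecross_altCore
  rw [if_neg (by omega)]
  simp only []
  set t := PySem.Chars.upper u with ht
  have hup : PySem.Chars.upper t = t := upper_idem u
  have hlen : t.length = u.length := length_upper u
  set n := t.length with hnn
  set m := n / 2 with hm
  have hn3 : 3 ≤ n := by omega
  -- B side: unfold the row loop and the final join into explicit appends
  rw [PySem.List.foldl_append_singleton_eq_map (pvAltRow t n),
      PySem.List.pyRange_of_pos 1 ((n:Int)-1) (by norm_num),
      if_pos (by omega : (1:Int) < (n:Int)-1),
      show (((n:Int)-1-1+1-1)/1).toNat = n - 2 by omega,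
      join_nil_flatten]
  simp only [List.map_append, List.map_map, List.map_cons, List.map_nil,
    List.flatten_append, List.flatten_cons, List.flatten_nil, List.append_nil]
  have hsp : pvSpaceout t = PySem.Chars.join [' '] (List.map (fun c => [c]) t) := by
    unfold pvSpaceout; rw [hup]
  rw [hsp]
  by_cases hpar : n % 2 = 1
  · have hbeq : (n % 2 == 1) = true := by simp [hpar]
    rw [if_pos hbeq]
    have hmval : n = 2*m+1 := by omega
    rw [foldl_enum_drop1 _ (fun ilr => pvRowA ilr.2.1 ilr.2.2 (2 * ilr.1 - 1).toNat (4 * ((m:Int) - ilr.1) - 1).toNat)]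
    rw [foldl_enum_dropLast _ (fun ilr => pvRowA ilr.2.1 ilr.2.2 (2 * ((m:Int) - ilr.1) - 3).toNat (4 * ilr.1 + 3).toNat)]
    rw [show ((List.take m t).zip (List.take m t.reverse)).length = m by simp; omega]
    rw [show ((List.drop (m+1) t).zip (List.drop (m+1) t.reverse)).length = m by simp; omega]
    dsimp only
    -- split B's row range into upper rows, centre row, lower rows
    have hrm : List.range m = List.range (m-1) ++ [m-1] := by
      conv_lhs => rw [show m = (m-1)+1 by omega]
      rw [List.range_succ]
    have hrange : List.range (n-2) = (List.range (m-1) ++ [m-1]) ++ (List.range (m-1)).map (fun k => m + k) := by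
      rw [show n - 2 = m + (m-1) by omega, List.range_add, hrm]
    rw [hrange]
    simp only [List.map_append, List.map_map, List.map_cons, List.map_nil,
      List.flatten_append, List.flatten_cons, List.flatten_nil, List.append_nil,
      ← List.flatMap_def]
    -- upper rows
    have hp1 : ∀ k ∈ List.range (m-1),
        (((fun row => row ++ ['\n']) ∘ pvAltRow t n ∘ fun k : Nat => 1 + 1 * (k:Int)) k)
        = pvRowA ((List.take m t).zip (List.take m t.reverse) |>.getD (k+1) (' ',' ')).1
            ((List.take m t).zip (List.take m t.reverse) |>.getD (k+1) (' ',' ')).2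
            (2 * ((k+1 : Nat) : Int) - 1).toNat (4 * ((m:Int) - ((k+1 : Nat) : Int)) - 1).toNat := by
      intro k hk
      have hk' : k < m - 1 := List.mem_range.mp hk
      rw [getD_zip _ _ _ (by simp; omega) (by simp; omega),
          getD_take t m (k+1) (by omega) (by omega),
          getD_take t.reverse m (k+1) (by omega) (by simp; omega),
          getD_rev t (k+1) (by omega)]
      simp only [Function.comp_apply]
      rw [show ((1:Int) + 1 * (k:Int)) = (((k+1 : Nat)) : Int) by push_cast; ring,
          row_upper t n (k+1) rfl (by omega) (by omega), pvRowA_eq]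
      rw [show ((2 * (((k+1:Nat)):Int) - 1).toNat) = 2*(k+1)-1 by omega,
          show ((4 * ((m:Int) - (((k+1:Nat)):Int)) - 1).toNat) = 2*n-4*(k+1)-3 by omega]
    rw [List.flatMap_congr hp1]
    have hpc : (((fun row => row ++ ['\n']) ∘ pvAltRow t n ∘ fun k : Nat => 1 + 1 * (k:Int)) (m-1))
        = [PySem.List.pyGetD t (↑m) ' '] ++ List.replicate (2 * (m:Int) - 1).toNat ' ' ++
          [PySem.List.pyGetD t (↑m) ' '] ++ List.replicate (2 * (m:Int) - 1).toNat ' ' ++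
          [PySem.List.pyGetD t (↑m) ' '] ++ ['\n'] := by
      simp only [Function.comp_apply]
      rw [show ((1:Int) + 1 * ((m-1 : Nat):Int)) = ((m:Nat):Int) by omega,
          row_center t n m rfl (by omega) (by omega) hn3,
          PySem.List.pyGetD_natCast t m ' ',
          show ((2*(m:Int)-1).toNat) = n-2 by omega,
          show n-1-m = m by omega]
      simp [rowSegC]
    rw [hpc]
    have hp2 : ∀ k ∈ List.range (m-1),
        ((((fun row => row ++ ['\n']) ∘ pvAltRow t n ∘ fun k : Nat => 1 + 1 * (k:Int)) ∘ fun k => m + k) k)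
        = pvRowA ((List.drop (m+1) t).zip (List.drop (m+1) t.reverse) |>.getD k (' ',' ')).1
            ((List.drop (m+1) t).zip (List.drop (m+1) t.reverse) |>.getD k (' ',' ')).2
            (2 * ((m:Int) - (k : Nat)) - 3).toNat (4 * ((k : Nat) : Int) + 3).toNat := by
      intro k hk
      have hk' : k < m - 1 := List.mem_range.mp hk
      rw [getD_zip _ _ _ (by simp; omega) (by simp; omega),
          getD_drop t (m+1) k (by omega),
          getD_drop t.reverse (m+1) k (by simp; omega),
          getD_rev t (m+1+k) (by omega)]
      simp only [Function.comp_apply]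
      rw [show ((1:Int) + 1 * ((m + k : Nat):Int)) = (((m+1+k : Nat)) : Int) by omega,
          row_lower t n (m+1+k) rfl (by omega) (by omega) hn3, pvRowA_eq]
      rw [show ((2 * ((m:Int) - ((k:Nat):Int)) - 3).toNat) = 2*n-3-2*(m+1+k) by omega,
          show ((4 * ((k:Nat):Int) + 3).toNat) = 4*(m+1+k)+1-2*n by omega,
          show n-1-(m+1+k) = n-1-(m+1+k) from rfl]
    rw [List.flatMap_congr hp2]
    simp [List.append_assoc]
  · have hbeq : (n % 2 == 1) = false := beq_eq_false_iff_ne.mpr hpar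
    rw [hbeq, if_neg (by simp)]
    have hmval : n = 2*m := by omega
    rw [foldl_enum_drop1 _ (fun ilr => pvRowA ilr.2.1 ilr.2.2 (2 * ilr.1 - 1).toNat (4 * ((m:Int) - ilr.1) - 3).toNat)]
    rw [foldl_enum_dropLast _ (fun ilr => pvRowA ilr.2.1 ilr.2.2 (2 * ((m:Int) - ilr.1) - 3).toNat (4 * ilr.1 + 1).toNat)]
    rw [show ((List.take m t).zip (List.take m t.reverse)).length = m by simp; omega]
    rw [show ((List.drop m t).zip (List.drop m t.reverse)).length = m by simp; omega]
    dsimp only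
    have hrange : List.range (n-2) = List.range (m-1) ++ (List.range (m-1)).map (fun k => (m-1) + k) := by
      rw [show n - 2 = (m-1) + (m-1) by omega, List.range_add]
    rw [hrange]
    simp only [List.map_append, List.map_map, List.flatten_append, ← List.flatMap_def]
    have hp1 : ∀ k ∈ List.range (m-1),
        (((fun row => row ++ ['\n']) ∘ pvAltRow t n ∘ fun k : Nat => 1 + 1 * (k:Int)) k)
        = pvRowA ((List.take m t).zip (List.take m t.reverse) |>.getD (k+1) (' ',' ')).1
            ((List.take m t).zip (List.take m t.reverse) |>.getD (k+1) (' ',' ')).2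
            (2 * ((k+1 : Nat) : Int) - 1).toNat (4 * ((m:Int) - ((k+1 : Nat) : Int)) - 3).toNat := by
      intro k hk
      have hk' : k < m - 1 := List.mem_range.mp hk
      rw [getD_zip _ _ _ (by simp; omega) (by simp; omega),
          getD_take t m (k+1) (by omega) (by omega),
          getD_take t.reverse m (k+1) (by omega) (by simp; omega),
          getD_rev t (k+1) (by omega)]
      simp only [Function.comp_apply]
      rw [show ((1:Int) + 1 * (k:Int)) = (((k+1 : Nat)) : Int) by push_cast; ring,
          row_upper t n (k+1) rfl (by omega) (by omega), pvRowA_eq]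
      rw [show ((2 * (((k+1:Nat)):Int) - 1).toNat) = 2*(k+1)-1 by omega,
          show ((4 * ((m:Int) - (((k+1:Nat)):Int)) - 3).toNat) = 2*n-4*(k+1)-3 by omega]
    rw [List.flatMap_congr hp1]
    have hp2 : ∀ k ∈ List.range (m-1),
        ((((fun row => row ++ ['\n']) ∘ pvAltRow t n ∘ fun k : Nat => 1 + 1 * (k:Int)) ∘ fun k => (m-1) + k) k)
        = pvRowA ((List.drop m t).zip (List.drop m t.reverse) |>.getD k (' ',' ')).1
            ((List.drop m t).zip (List.drop m t.reverse) |>.getD k (' ',' ')).2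
            (2 * ((m:Int) - (k : Nat)) - 3).toNat (4 * ((k : Nat) : Int) + 1).toNat := by
      intro k hk
      have hk' : k < m - 1 := List.mem_range.mp hk
      rw [getD_zip _ _ _ (by simp; omega) (by simp; omega),
          getD_drop t m k (by omega),
          getD_drop t.reverse m k (by simp; omega),
          getD_rev t (m+k) (by omega)]
      simp only [Function.comp_apply]
      rw [show ((1:Int) + 1 * ((m - 1 + k : Nat):Int)) = (((m+k : Nat)) : Int) by omega,
          row_lower t n (m+k) rfl (by omega) (by omega) hn3, pvRowA_eq]
      rw [show ((2 * ((m:Int) - ((k:Nat):Int)) - 3).toNat) = 2*n-3-2*(m+k) by omega,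
          show ((4 * ((k:Nat):Int) + 1).toNat) = 4*(m+k)+1-2*n by omega]
    rw [List.flatMap_congr hp2]
    simp [List.append_assoc]

theorem core_eq (u : List Char) : squarecrossCore u = squarecross_altCore u := by
  by_cases hle : u.length ≤ 2
  · exact core_small u hle
  · exact core_main u (by omega)


-- ===== VERDICT (by name: the statement is the Claim_ definition above) =====
theorem squarecross_spec : Claim_equal_squarecross := by
  intro text _
  unfold Spec_squarecross squarecross squarecross_alt
  rw [core_eq]
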